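-- pv_equiv track=rewrite | github.com/LAAOUAFIFATIHA/TP_Python | tp2/TD2.py | longmin
-- ===== SOURCE A (Python) =====
-- def longmin(n):
--     s = ""
--     list_s = []
--     for c in n:
--         if c.islower():
--             s = c + s
--         else:
--             if s:
--                 list_s.append(s)
--             s = ""
--     if s:
--         list_s.append(s)
--     resultat = max(list_s, key=len)
--     return len(resultat)
-- ===== SOURCE B (Python) =====
-- def longmin(n):
--     best = cur = 0
--     for c in n:
--         if c.islower():
--             cur += 1
--             if cur > best:
--                 best = cur
--         else:
--             cur = 0
--     return best
-- ===== Notes on version B (the rewrite author's own statement) =====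
-- stated objective: faster
-- what changed: B replaces A's run-list construction (string concatenation per char, then max over the collected runs) with a single pass keeping only the current and best run lengths.
-- outside the precondition, e.g. on longmin('ABC'): A raises ValueError, B returns 0
-- crash fix: On strings with no lowercase character A raises ValueError (max() of an empty list); B returns 0. — e.g. on longmin("ABC"): A raises ValueError, B returns 0
import Mathlib
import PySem

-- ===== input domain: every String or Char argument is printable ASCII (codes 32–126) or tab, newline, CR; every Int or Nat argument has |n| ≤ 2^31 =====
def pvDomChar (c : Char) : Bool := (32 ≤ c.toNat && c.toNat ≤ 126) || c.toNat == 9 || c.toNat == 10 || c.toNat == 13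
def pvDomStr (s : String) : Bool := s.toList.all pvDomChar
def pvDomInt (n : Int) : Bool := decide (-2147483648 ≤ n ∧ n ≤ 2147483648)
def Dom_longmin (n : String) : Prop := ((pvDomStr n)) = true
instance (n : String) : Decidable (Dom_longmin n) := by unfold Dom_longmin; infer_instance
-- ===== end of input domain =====

-- B replaces A's run-list construction with a single pass over the string keeping
-- only the current and best lowercase-run lengths (asymptotically faster).

-- ===== PORT A =====
-- loop body of A: s accumulates the current run (c + s, so reversed), list_s the finished runs
def longminStep (st : List Char × List (List Char)) (c : Char) : List Char × List (List Char) :=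
  if PySem.Chars.islower c then (c :: st.1, st.2)
  else if st.1 ≠ [] then ([], st.2 ++ [st.1]) else ([], st.2)

def longmin (n : String) : Int :=
  let st := n.toList.foldl longminStep ([], [])
  let list_s := if st.1 ≠ [] then st.2 ++ [st.1] else st.2
  -- max(list_s, key=len); on an empty list Python raises ValueError (excluded by Pre_)
  match PySem.List.max? list_s (fun r => (r.length : Int)) with
  | some r => (r.length : Int)
  | none => 0

-- ===== PORT B =====
def longminAltStep (bc : Int × Int) (c : Char) : Int × Int :=
  if PySem.Chars.islower c then
    let cur := bc.2 + 1
    (if cur > bc.1 then cur else bc.1, cur)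
  else (bc.1, 0)

def longmin_alt (n : String) : Int :=
  (n.toList.foldl longminAltStep (0, 0)).1

-- ===== PRECONDITION & SPEC =====
-- Pre_ excludes exactly the strings with no lowercase character, on which A's max([]) raises ValueError.
def Pre_longmin (n : String) : Prop := n.toList.any PySem.Chars.islower = true
instance (n : String) : Decidable (Pre_longmin n) := by unfold Pre_longmin; infer_instance
def pvWitness_longmin : String := "ab C"

-- On strings with no lowercase character A raises ValueError (max() of an empty list); B returns 0.
def Raises_longmin (n : String) : Prop := n.toList.all (fun c => !PySem.Chars.islower c) = true
instance (n : String) : Decidable (Raises_longmin n) := by unfold Raises_longmin; infer_instance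
def pvRaiseWitness_longmin : String := "ABC"
def pvRaiseWitnessOut_longmin : Int := 0

def Spec_longmin (n : String) (out : Int) : Prop := out = longmin_alt n
instance (n : String) (out : Int) : Decidable (Spec_longmin n out) := by unfold Spec_longmin; infer_instance

-- ===== CLAIM (what is proved, stated in full; the proofs are below) =====
def Claim_equal_longmin : Prop := ∀ (n : String), Dom_longmin n → Pre_longmin n → Spec_longmin n (longmin n)
def Claim_raises_longmin : Prop := (∀ (n : String), Dom_longmin n → Raises_longmin n → ¬ Pre_longmin n) ∧ (Dom_longmin (pvRaiseWitness_longmin) ∧ Raises_longmin (pvRaiseWitness_longmin) ∧ longmin_alt (pvRaiseWitness_longmin) = pvRaiseWitnessOut_longmin)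

-- ===== LEMMAS AND PROOFS =====

-- max of the lengths of the collected runs, as B's best-so-far computes it
def runMax (ls : List (List Char)) : Int :=
  (ls.map (fun r => (r.length : Int))).foldl max 0

theorem foldl_max_ge (L : List Int) (a : Int) : a ≤ L.foldl max a := by
  induction L generalizing a with
  | nil => simp
  | cons x t ih => exact le_trans (le_max_left a x) (ih (max a x))

theorem foldl_max_of_le (L : List Int) (a : Int) (h : ∀ x ∈ L, x ≤ a) :
    L.foldl max a = a := by
  induction L generalizing a with
  | nil => rfl
  | cons x t ih =>
      have hx : max a x = a := max_eq_left (h x (List.mem_cons_self))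
      simpa [List.foldl, hx] using ih a (fun y hy => h y (List.mem_cons_of_mem _ hy))

theorem foldl_max_eq (L : List Int) (m a : Int) (hm : m ∈ L)
    (hub : ∀ x ∈ L, x ≤ m) (ha : a ≤ m) : L.foldl max a = m := by
  induction L generalizing a with
  | nil => cases hm
  | cons x t ih =>
      rcases List.mem_cons.mp hm with hm | hm
      · subst hm
        have hmax : max a m = m := max_eq_right ha
        simp only [List.foldl, hmax]
        exact foldl_max_of_le t m (fun y hy => hub y (List.mem_cons_of_mem _ hy))
      · exact ih (max a x) hm (fun y hy => hub y (List.mem_cons_of_mem _ hy))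
          (max_le ha (hub x (List.mem_cons_self)))

theorem runMax_nonneg (ls : List (List Char)) : 0 ≤ runMax ls :=
  foldl_max_ge _ 0

theorem runMax_append (ls : List (List Char)) (s : List Char) :
    runMax (ls ++ [s]) = max (runMax ls) (s.length : Int) := by
  simp [runMax, List.foldl_append]

-- invariant: B's fold from (max (runMax ls) |s|, |s|) mirrors A's fold from (s, ls)
theorem inv (l : List Char) (s : List Char) (ls : List (List Char)) :
    l.foldl longminAltStep (max (runMax ls) (s.length : Int), (s.length : Int)) =
      (max (runMax ((l.foldl longminStep (s, ls)).2))
           (((l.foldl longminStep (s, ls)).1.length : Int)),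
       ((l.foldl longminStep (s, ls)).1.length : Int)) := by
  induction l generalizing s ls with
  | nil => rfl
  | cons c t ih =>
      simp only [List.foldl]
      by_cases hc : PySem.Chars.islower c = true
      · rw [show longminStep (s, ls) c = (c :: s, ls) from by simp [longminStep, hc]]
        rw [show longminAltStep (max (runMax ls) (s.length : Int), (s.length : Int)) c =
            (max (runMax ls) ((s.length : Int) + 1), (s.length : Int) + 1) from by
          simp only [longminAltStep, hc, if_true]
          rw [show (if (s.length : Int) + 1 > max (runMax ls) (s.length : Int)
                then (s.length : Int) + 1 else max (runMax ls) (s.length : Int)) =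
              max (runMax ls) ((s.length : Int) + 1) from by split_ifs <;> omega]]
        have H := ih (c :: s) ls
        simp only [List.length_cons, Nat.cast_add, Nat.cast_one] at H
        exact H
      · by_cases hs : s = []
        · subst hs
          rw [show longminStep (([] : List Char), ls) c = ([], ls) from by
            simp [longminStep, hc]]
          rw [show longminAltStep (max (runMax ls) ((([] : List Char)).length : Int),
              ((([] : List Char)).length : Int)) c =
              (max (runMax ls) ((([] : List Char)).length : Int),
               ((([] : List Char)).length : Int)) from by simp [longminAltStep, hc]]
          exact ih [] ls
        · rw [show longminStep (s, ls) c = ([], ls ++ [s]) from by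
            simp [longminStep, hc, hs]]
          rw [show longminAltStep (max (runMax ls) (s.length : Int), (s.length : Int)) c =
              (max (runMax (ls ++ [s])) ((0 : Int)), (0 : Int)) from by
            simp only [longminAltStep, hc, Bool.false_eq_true, if_false]
            rw [show max (runMax (ls ++ [s])) (0 : Int) = max (runMax ls) (s.length : Int) from by
              have h0 := runMax_nonneg ls
              rw [runMax_append]; omega]]
          have H := ih [] (ls ++ [s])
          simp only [List.length_nil, Nat.cast_zero] at H
          exact H

-- if a lowercase char occurs (or the state is already nonempty), the final state is nonempty
theorem nonempty_state (l : List Char) (s : List Char) (ls : List (List Char))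
    (h : l.any PySem.Chars.islower = true ∨ s ≠ [] ∨ ls ≠ []) :
    (l.foldl longminStep (s, ls)).1 ≠ [] ∨ (l.foldl longminStep (s, ls)).2 ≠ [] := by
  induction l generalizing s ls with
  | nil =>
      rcases h with h | h | h
      · exact absurd h (by simp)
      · exact Or.inl h
      · exact Or.inr h
  | cons c t ih =>
      simp only [List.foldl]
      by_cases hc : PySem.Chars.islower c = true
      · rw [show longminStep (s, ls) c = (c :: s, ls) from by simp [longminStep, hc]]
        exact ih (c :: s) ls (Or.inr (Or.inl (by simp)))
      · have hc' : PySem.Chars.islower c = false := by simpa using hc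
        by_cases hs : s = []
        · subst hs
          rw [show longminStep (([] : List Char), ls) c = ([], ls) from by
            simp [longminStep, hc]]
          refine ih [] ls ?_
          rcases h with h | h | h
          · simp only [List.any_cons, hc', Bool.false_or] at h
            exact Or.inl h
          · exact absurd rfl h
          · exact Or.inr (Or.inr h)
        · rw [show longminStep (s, ls) c = ([], ls ++ [s]) from by
            simp [longminStep, hc, hs]]
          exact ih [] (ls ++ [s]) (Or.inr (Or.inr (by simp)))

-- first-max-by-len of a nonempty run list has length runMax
theorem max?_len (ls : List (List Char)) (hne : ls ≠ []) :
    (match PySem.List.max? ls (fun r => (r.length : Int)) with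
      | some r => (r.length : Int)
      | none => 0) = runMax ls := by
  cases hmax : PySem.List.max? ls (fun r => (r.length : Int)) with
  | none => exact absurd ((PySem.List.max?_eq_none_iff ls _).mp hmax) hne
  | some r =>
      have hmem := PySem.List.max?_mem hmax
      have hub := PySem.List.max?_isMax hmax
      have : runMax ls = (r.length : Int) := by
        refine foldl_max_eq _ _ _ (by simpa using List.mem_map_of_mem hmem) ?_ (by positivity)
        intro x hx
        rcases List.mem_map.mp hx with ⟨y, hy, rfl⟩
        exact hub y hy
      simp [this]

-- ===== VERDICT (by name: the statement is the Claim_ definition above) =====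
theorem longmin_spec : Claim_equal_longmin := by
  intro n _ hpre
  unfold Spec_longmin longmin_alt
  have hA : longmin n =
      (match PySem.List.max?
          (if (n.toList.foldl longminStep ([], [])).1 ≠ []
            then (n.toList.foldl longminStep ([], [])).2 ++ [(n.toList.foldl longminStep ([], [])).1]
            else (n.toList.foldl longminStep ([], [])).2)
          (fun r => (r.length : Int)) with
        | some r => (r.length : Int)
        | none => 0) := rfl
  rw [hA]
  have hinv := inv n.toList [] []
  have h00 : (max (runMax []) ((List.length ([] : List Char)) : Int),
      ((List.length ([] : List Char)) : Int)) = ((0 : Int), (0 : Int)) := by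
    simp [runMax]
  rw [h00] at hinv
  rw [hinv]
  set st := n.toList.foldl longminStep ([], []) with hst
  have hne := nonempty_state n.toList [] [] (Or.inl hpre)
  rw [← hst] at hne
  by_cases h1 : st.1 = []
  · rw [show (if st.1 ≠ [] then st.2 ++ [st.1] else st.2) = st.2 from by simp [h1]]
    have hne2 : st.2 ≠ [] := by tauto
    rw [max?_len st.2 hne2]
    simp [h1, max_eq_left (runMax_nonneg st.2)]
  · rw [show (if st.1 ≠ [] then st.2 ++ [st.1] else st.2) = st.2 ++ [st.1] from by simp [h1]]
    rw [max?_len (st.2 ++ [st.1]) (by simp), runMax_append]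

theorem longmin_raises : Claim_raises_longmin := by
  unfold Claim_raises_longmin
  refine ⟨?_, by decide⟩
  intro n _ hr hp
  unfold Pre_longmin at hp
  unfold Raises_longmin at hr
  simp only [List.any_eq_true] at hp
  simp only [List.all_eq_true, Bool.not_eq_true'] at hr
  rcases hp with ⟨c, hc, hcl⟩
  rw [hr c hc] at hcl
  exact Bool.false_ne_true hcl

-- self-check: B's port really returns the stated value at the raise witness (uses longmin_raises)
theorem longmin_raises_ok : longmin_alt pvRaiseWitness_longmin = pvRaiseWitnessOut_longmin :=
  longmin_raises.2.2.2
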